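-- pv_equiv track=rewrite | github.com/0ctagon/ukulele | makedatabase.py | getPositionsFromNote
-- ===== SOURCE A (Python) =====
-- MAX_FRETS = 17
--
-- ALLNOTES = ["A", "A#", "B", "C", "C#", "D", "D#", "E", "F", "F#", "G", "G#", "A", "A#", "B", "C", "C#", "D", "D#", "E", "F", "F#", "G", "G#", "A", "A#", "B", "C", "C#", "D", "D#", "E", "F", "F#", "G", "G#"]
--
-- def getPositionsFromNote(tuning, note):
--     idxTuning = ALLNOTES.index(tuning)
--     positions = []
--     position = 0
--     for i in range(len(ALLNOTES) - idxTuning):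
--         if (position > MAX_FRETS): break
--         if (ALLNOTES[idxTuning + i] == note): positions.append(position)
--         position += 1
--     return positions
-- ===== SOURCE B (Python) =====
-- MAX_FRETS = 17
--
-- ALLNOTES = ["A", "A#", "B", "C", "C#", "D", "D#", "E", "F", "F#", "G", "G#", "A", "A#", "B", "C", "C#", "D", "D#", "E", "F", "F#", "G", "G#", "A", "A#", "B", "C", "C#", "D", "D#", "E", "F", "F#", "G", "G#"]
--
-- NOTE_PC = {name: i for i, name in enumerate(ALLNOTES[:12])}
--
-- def getPositionsFromNote(tuning, note):
--     idxTuning = ALLNOTES.index(tuning)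
--     pc = NOTE_PC.get(note)
--     if pc is None:
--         return []
--     f0 = (pc - idxTuning) % 12
--     return list(range(f0, MAX_FRETS + 1, 12))
-- ===== Notes on version B (the rewrite author's own statement) =====
-- stated objective: simpler
-- what changed: Replaces A's per-fret scan over the 36-entry ALLNOTES list (with a manual break counter) by a pitch-class dictionary lookup and a single closed-form arithmetic progression range((pc - idxTuning) % 12, 18, 12).
-- outside the precondition, e.g. on getPositionsFromNote('H', 'A'): A raises ValueError, B raises ValueError
import Mathlib
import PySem

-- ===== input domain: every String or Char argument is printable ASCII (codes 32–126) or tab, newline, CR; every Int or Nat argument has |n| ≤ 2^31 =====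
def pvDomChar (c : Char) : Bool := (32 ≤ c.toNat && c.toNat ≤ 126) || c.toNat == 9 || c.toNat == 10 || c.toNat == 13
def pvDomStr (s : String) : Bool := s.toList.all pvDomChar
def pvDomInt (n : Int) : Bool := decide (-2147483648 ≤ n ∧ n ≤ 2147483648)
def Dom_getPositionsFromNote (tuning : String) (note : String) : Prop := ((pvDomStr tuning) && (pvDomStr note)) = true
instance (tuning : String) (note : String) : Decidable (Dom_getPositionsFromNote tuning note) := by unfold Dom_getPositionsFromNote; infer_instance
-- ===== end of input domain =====

-- B replaces A's per-fret scan over ALLNOTES with a pitch-class dict lookup and one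
-- arithmetic progression range(f0, 18, 12) (objective: simpler closed-form computation).

-- ===== PORT A =====
def pvAllNotes : List String :=
  ["A","A#","B","C","C#","D","D#","E","F","F#","G","G#",
   "A","A#","B","C","C#","D","D#","E","F","F#","G","G#",
   "A","A#","B","C","C#","D","D#","E","F","F#","G","G#"]

-- the test 'ALLNOTES[idxTuning + i] == note' (always an in-range index in A's loop)
def pvCond (idxTuning : Int) (note : String) (i : Int) : Bool :=
  (PySem.List.pyGet? pvAllNotes (idxTuning + i)).getD "" == note

-- A's loop body over state (positions, position, broken)
def pvLoopBody (idxTuning : Int) (note : String) (st : List Int × Int × Bool) (i : Int) :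
    List Int × Int × Bool :=
  match st with
  | (ps, pos, true) => (ps, pos, true)                 -- loop already broken
  | (ps, pos, false) =>
    if pos > 17 then (ps, pos, true)                   -- break
    else ((if pvCond idxTuning note i then ps ++ [pos] else ps), pos + 1, false)

def getPositionsFromNote (tuning : String) (note : String) : List Int :=
  let idxTuning : Int := ((PySem.List.index? pvAllNotes tuning).getD 0 : Nat)
  ((PySem.List.pyRange 0 ((pvAllNotes.length : Int) - idxTuning) 1).foldl
      (pvLoopBody idxTuning note) ([], 0, false)).1

-- ===== PORT B =====
-- NOTE_PC = {name: i for i, name in enumerate(ALLNOTES[:12])}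
def pvNotePC : PySem.Dict String Int :=
  (PySem.List.enumerate (PySem.List.slice pvAllNotes none (some 12))).foldl
    (fun d p => d.insert p.2 p.1) PySem.Dict.empty

def getPositionsFromNote_alt (tuning : String) (note : String) : List Int :=
  let idxTuning : Int := ((PySem.List.index? pvAllNotes tuning).getD 0 : Nat)
  match pvNotePC.get? note with
  | none => []
  | some pc => PySem.List.pyRange (PySem.Int.mod (pc - idxTuning) 12) 18 12

-- ===== PRECONDITION & SPEC =====
-- Pre_ excludes exactly the inputs on which Python A raises ValueError: tunings not in ALLNOTES.
def Pre_getPositionsFromNote (tuning : String) (note : String) : Prop := tuning ∈ pvAllNotes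
instance (tuning : String) (note : String) : Decidable (Pre_getPositionsFromNote tuning note) := by unfold Pre_getPositionsFromNote; infer_instance

def pvWitness_getPositionsFromNote : String × String := ("C", "E")

def Spec_getPositionsFromNote (tuning : String) (note : String) (out : List Int) : Prop := out = getPositionsFromNote_alt tuning note
instance (tuning : String) (note : String) (out : List Int) : Decidable (Spec_getPositionsFromNote tuning note out) := by unfold Spec_getPositionsFromNote; infer_instance

-- ===== CLAIM (what is proved, stated in full; the proofs are below) =====
def Claim_equal_getPositionsFromNote : Prop := ∀ (tuning : String) (note : String), Dom_getPositionsFromNote tuning note → Pre_getPositionsFromNote tuning note → Spec_getPositionsFromNote tuning note (getPositionsFromNote tuning note)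

-- ===== LEMMAS AND PROOFS =====

-- the twelve note names (= ALLNOTES[:12])
def pvNoteNames : List String :=
  ["A","A#","B","C","C#","D","D#","E","F","F#","G","G#"]

-- ALLNOTES is three copies of the twelve note names: position k holds name k % 12
lemma pvPeriodic : ∀ k : Nat, k < 36 → pvAllNotes[k]? = pvNoteNames[k % 12]? := by decide

lemma pvNamesNodup : pvNoteNames.Nodup := by decide

lemma pvAllLen : pvAllNotes.length = 36 := by rfl

lemma pvNamesLen : pvNoteNames.length = 12 := by rfl

-- once broken, the loop state never changes
lemma pvLoopBody_broken (j : Int) (note : String) (l : List Int) (ps : List Int) (pos : Int) :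
    l.foldl (pvLoopBody j note) (ps, pos, true) = (ps, pos, true) := by
  induction l with
  | nil => rfl
  | cons x xs ih => simpa [pvLoopBody] using ih

-- from position 18 the loop breaks immediately: positions are final
lemma pvLoopBody_at18 (j : Int) (note : String) (l : List Int) (ps : List Int) :
    (l.foldl (pvLoopBody j note) (ps, 18, false)).1 = ps := by
  cases l with
  | nil => rfl
  | cons x xs =>
    have h1 : pvLoopBody j note (ps, 18, false) x = (ps, 18, true) := by
      simp [pvLoopBody]
    rw [List.foldl_cons, h1, pvLoopBody_broken]

-- loop invariant: below fret 18 the loop filters the positions by pvCond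
lemma pvLoop_inv (j : Int) (note : String) :
    ∀ (n : Nat) (a : Int) (ps : List Int), a = 18 - (n : Int) → 0 ≤ a →
      (PySem.List.pyRange a 18 1).foldl (pvLoopBody j note) (ps, a, false)
        = (ps ++ (PySem.List.pyRange a 18 1).filter (pvCond j note), 18, false) := by
  intro n
  induction n with
  | zero =>
    intro a ps ha _
    have : a = 18 := by omega
    subst this
    simp [PySem.List.pyRange_one_eq_nil (le_refl (18 : Int))]
  | succ n ih =>
    intro a ps ha h0
    have hlt : a < 18 := by omega
    rw [PySem.List.pyRange_one_cons hlt]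
    have hstep : pvLoopBody j note (ps, a, false) a
        = ((if pvCond j note a then ps ++ [a] else ps), a + 1, false) := by
      simp only [pvLoopBody]
      rw [if_neg (by omega : ¬ a > 17)]
    rw [List.foldl_cons, hstep, ih (a + 1) _ (by omega) (by omega)]
    by_cases hc : pvCond j note a <;> simp [hc]

-- a valid tuning is found among the first twelve entries
lemma pvIndexLt12 (tuning : String) (jn : Nat)
    (hj : PySem.List.index? pvAllNotes tuning = some jn) : jn < 12 := by
  obtain ⟨hk, hget, hmin⟩ := PySem.List.getElem_of_index?_eq_some hj
  by_contra h
  have h36 : jn < 36 := by rw [pvAllLen] at hk; exact hk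
  have e1 := pvPeriodic (jn - 12) (by omega)
  have e2 := pvPeriodic jn h36
  have hmod : (jn - 12) % 12 = jn % 12 := by omega
  have hlt : jn - 12 < pvAllNotes.length := by rw [pvAllLen]; omega
  have hsome : pvAllNotes[jn - 12]? = some tuning := by
    rw [e1, hmod, ← e2, List.getElem?_eq_getElem hk, hget]
  have hv : pvAllNotes[jn - 12] = tuning := by
    rw [List.getElem?_eq_getElem hlt] at hsome
    exact Option.some.inj hsome
  exact hmin (jn - 12) (by omega) hv

-- characterization of A: the scanned positions 0..17, filtered by pvCond
lemma pvAChar (tuning note : String) (jn : Nat)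
    (hj : PySem.List.index? pvAllNotes tuning = some jn) (hj12 : jn < 12) :
    getPositionsFromNote tuning note
      = (PySem.List.pyRange 0 18 1).filter (pvCond (jn : Int) note) := by
  simp only [getPositionsFromNote, hj, Option.getD_some]
  have h36 : ((pvAllNotes.length : Nat) : Int) = 36 := by norm_num [pvAllLen]
  rw [h36]
  rw [PySem.List.pyRange_one_append 0 18 (36 - (jn : Int)) (by norm_num) (by omega),
      List.foldl_append]
  rw [pvLoop_inv (jn : Int) note 18 0 [] (by norm_num) (by norm_num)]
  simpa using pvLoopBody_at18 (jn : Int) note _ _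

-- looking a key up in a dict built by inserting distinct enumerated keys is index?
lemma pvGen (note : String) : ∀ (l : List String) (s : Int) (d : PySem.Dict String Int),
    l.Nodup →
    ((PySem.List.enumerate l s).foldl (fun d p => d.insert p.2 p.1) d).get? note
      = (match PySem.List.index? l note with
         | some k => some ((k : Int) + s)
         | none => d.get? note) := by
  intro l
  induction l with
  | nil =>
    intro s d _
    have : PySem.List.index? ([] : List String) note = none :=
      (PySem.List.index?_eq_none_iff _ _).mpr (List.not_mem_nil)
    simp [PySem.List.enumerate]
  | cons x xs ih =>
    intro s d hnd
    rw [PySem.List.enumerate_cons, List.foldl_cons]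
    by_cases hx : x = note
    · subst hx
      have hnx : x ∉ xs := (List.nodup_cons.mp hnd).1
      rw [PySem.List.index?_cons_self, ih (s + 1) _ (List.nodup_cons.mp hnd).2,
          (PySem.List.index?_eq_none_iff xs x).mpr hnx]
      simp [PySem.Dict.get?_insert_self]
    · rw [PySem.List.index?_cons_of_ne xs hx, ih (s + 1) _ (List.nodup_cons.mp hnd).2]
      cases hix : PySem.List.index? xs note with
      | none => simp [PySem.Dict.get?_insert_of_ne _ _ (Ne.symm hx)]
      | some k =>
        simp only [Option.map_some]
        congr 1
        push_cast
        ring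

-- B's dict lookup is the pitch-class index in the twelve note names
lemma pvGetPC (note : String) :
    pvNotePC.get? note = (PySem.List.index? pvNoteNames note).map (fun k => (k : Int)) := by
  have hs : PySem.List.slice pvAllNotes none (some 12) = pvNoteNames := rfl
  have h := pvGen note pvNoteNames 0 PySem.Dict.empty pvNamesNodup
  simp only [pvNotePC, hs]
  rw [h]
  cases PySem.List.index? pvNoteNames note <;> simp [PySem.Dict.get?_empty]

-- the scan test, rephrased arithmetically when note has pitch class pcn
lemma pvCondIff (jn pcn : Nat) (note : String) (hj12 : jn < 12)
    (hpc : PySem.List.index? pvNoteNames note = some pcn) (p : Int)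
    (hp0 : 0 ≤ p) (hp : p < 18) :
    pvCond (jn : Int) note p = decide ((((jn : Int) + p) % 12) = (pcn : Int)) := by
  obtain ⟨hk, hget, _⟩ := PySem.List.getElem_of_index?_eq_some hpc
  have h1 : 0 ≤ (jn : Int) + p := by omega
  have h2 : ((jn : Int) + p).toNat < 36 := by omega
  have h3 : ((jn : Int) + p).toNat % 12 < pvNoteNames.length := by
    rw [pvNamesLen]; omega
  unfold pvCond
  rw [PySem.List.pyGet?_of_nonneg pvAllNotes h1, pvPeriodic _ h2,
      List.getElem?_eq_getElem h3, Option.getD_some, ← hget]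
  have hinj := pvNamesNodup.getElem_inj_iff (hi := h3) (hj := hk)
  rw [Bool.eq_iff_iff]
  simp only [beq_iff_eq, decide_eq_true_eq]
  rw [hinj]
  omega

-- the filtered scan equals one arithmetic progression of step 12
lemma pvArith (j pc : Int) (_hj0 : 0 ≤ j) (_hj : j < 12) (hpc0 : 0 ≤ pc) (hpc : pc < 12) :
    (PySem.List.pyRange 0 18 1).filter (fun p => decide ((j + p) % 12 = pc))
      = PySem.List.pyRange (PySem.Int.mod (pc - j) 12) 18 12 := by
  rw [PySem.Int.mod_eq_emod_of_pos (by norm_num)]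
  have hf0 : 0 ≤ (pc - j) % 12 := Int.emod_nonneg _ (by norm_num)
  have hf1 : (pc - j) % 12 < 12 := Int.emod_lt_of_pos _ (by norm_num)
  have h1 : ((PySem.List.pyRange 0 18 1).filter
      (fun p => decide ((j + p) % 12 = pc))).Pairwise (· < ·) :=
    (PySem.List.pairwise_lt_pyRange_one 0 18).filter _
  have h2 : (PySem.List.pyRange ((pc - j) % 12) 18 12).Pairwise (· < ·) := by
    rw [PySem.List.pyRange_of_pos _ _ (by norm_num)]
    refine List.pairwise_map.mpr (List.pairwise_lt_range.imp ?_)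
    intro a b hab
    omega
  have hm : ∀ x, x ∈ (PySem.List.pyRange 0 18 1).filter (fun p => decide ((j + p) % 12 = pc))
      ↔ x ∈ PySem.List.pyRange ((pc - j) % 12) 18 12 := by
    intro x
    rw [List.mem_filter, PySem.List.mem_pyRange_one,
        PySem.List.mem_pyRange_iff_of_pos (show (0 : Int) < 12 by norm_num) x]
    simp only [decide_eq_true_eq]
    omega
  have hperm := (List.perm_ext_iff_of_nodup h1.nodup h2.nodup).mpr hm
  exact List.Perm.eq_of_pairwise (fun a b _ _ hab hba => by omega)
    (h1.imp le_of_lt) (h2.imp le_of_lt) hperm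

-- ===== VERDICT (by name: the statement is the Claim_ definition above) =====
theorem getPositionsFromNote_spec : Claim_equal_getPositionsFromNote := by
  intro tuning note _ hpre
  unfold Spec_getPositionsFromNote
  obtain ⟨jn, hj⟩ := Option.isSome_iff_exists.mp
    ((PySem.List.index?_isSome_iff pvAllNotes tuning).mpr hpre)
  have hj12 := pvIndexLt12 tuning jn hj
  rw [pvAChar tuning note jn hj hj12]
  simp only [getPositionsFromNote_alt, hj, Option.getD_some]
  rw [pvGetPC note]
  cases hpc : PySem.List.index? pvNoteNames note with
  | none =>
    have hnote : note ∉ pvNoteNames := (PySem.List.index?_eq_none_iff _ _).mp hpc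
    refine List.filter_eq_nil_iff.mpr ?_
    intro p hp
    obtain ⟨hp0, hp18⟩ := PySem.List.mem_pyRange_one.mp hp
    have h1 : 0 ≤ (jn : Int) + p := by omega
    have h2 : ((jn : Int) + p).toNat < 36 := by omega
    have h3 : ((jn : Int) + p).toNat % 12 < pvNoteNames.length := by
      rw [pvNamesLen]; omega
    unfold pvCond
    rw [PySem.List.pyGet?_of_nonneg pvAllNotes h1, pvPeriodic _ h2,
        List.getElem?_eq_getElem h3, Option.getD_some]
    simp only [beq_iff_eq]
    intro hEq
    exact hnote (hEq ▸ List.getElem_mem h3)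
  | some pcn =>
    obtain ⟨hk, _, _⟩ := PySem.List.getElem_of_index?_eq_some hpc
    have hk12 : pcn < 12 := by rw [pvNamesLen] at hk; exact hk
    rw [List.filter_congr (fun p hp => by
      obtain ⟨hp0, hp18⟩ := PySem.List.mem_pyRange_one.mp hp
      exact pvCondIff jn pcn note hj12 hpc p hp0 hp18)]
    exact pvArith (jn : Int) (pcn : Int) (by omega) (by omega) (by omega) (by omega)
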